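-- pv_equiv track=rewrite | github.com/sajjadium/ctf-archives | ctfs/BDSec/2022/crypto/Dominoes/encrypt.py | y
-- ===== SOURCE A (Python) =====
-- def y(c):
--
-- 	a = list(c)
--
-- 	for i in range(len(c)):
-- 		b = c[i]
-- 		for j in range(i + 1, len(c)):
-- 			b = chr(ord(b) ^ ord(c[j]))
-- 		a[i] = b
--
-- 	return "".join(a)
-- ===== SOURCE B (Python) =====
-- def y(c):
--     acc = 0
--     out = []
--     for ch in reversed(c):
--         acc ^= ord(ch)
--         out.append(chr(acc))
--     return "".join(reversed(out))
-- ===== Notes on version B (the rewrite author's own statement) =====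
-- stated objective: faster
-- what changed: Replaced the per-position inner XOR loop over the suffix by a single right-to-left pass keeping a running XOR accumulator.
import Mathlib
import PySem

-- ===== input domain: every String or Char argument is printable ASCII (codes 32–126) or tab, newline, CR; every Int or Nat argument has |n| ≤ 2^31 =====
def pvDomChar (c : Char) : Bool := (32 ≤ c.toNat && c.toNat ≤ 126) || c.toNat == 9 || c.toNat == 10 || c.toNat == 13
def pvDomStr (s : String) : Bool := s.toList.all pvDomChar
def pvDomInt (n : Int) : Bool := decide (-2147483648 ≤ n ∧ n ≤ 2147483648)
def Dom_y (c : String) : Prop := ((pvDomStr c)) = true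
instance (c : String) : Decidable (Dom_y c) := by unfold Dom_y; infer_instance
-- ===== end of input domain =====

-- B replaces A's quadratic per-position suffix XOR loop by one right-to-left pass
-- with a running XOR accumulator (objective: faster).

-- ===== PORT A =====
-- a = list(c); for i in range(len(c)): b = c[i]; for j in range(i+1, len(c)): b = chr(ord b ^ ord c[j]); a[i] = b
def y (c : String) : String :=
  let cs := c.toList
  let a := (List.range cs.length).foldl
    (fun a i =>
      let b := (List.range' (i + 1) (cs.length - (i + 1))).foldl
        (fun b j => Char.ofNat (b.toNat ^^^ (cs.getD j ' ').toNat))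
        (cs.getD i ' ')
      a.set i b)
    cs
  String.mk a

-- ===== PORT B =====
def y_alt (c : String) : String :=
  let st := c.toList.reverse.foldl
    (fun (st : Nat × List Char) ch =>
      let acc := st.1 ^^^ ch.toNat
      (acc, st.2 ++ [Char.ofNat acc]))
    (0, [])
  String.mk st.2.reverse

-- ===== PRECONDITION & SPEC =====
def Spec_y (c : String) (out : String) : Prop := out = y_alt c
instance (c : String) (out : String) : Decidable (Spec_y c out) := by unfold Spec_y; infer_instance

-- ===== CLAIM (what is proved, stated in full; the proofs are below) =====
def Claim_equal_y : Prop := ∀ (c : String), Dom_y c → Spec_y c (y c)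

-- ===== LEMMAS AND PROOFS =====

-- XOR of the char codes of a list (suffix XOR value)
def xorN (l : List Char) : Nat := l.foldr (fun ch n => ch.toNat ^^^ n) 0

-- the common specification: each position i replaced by Char.ofNat (xorN (suffix from i))
def suff : List Char → List Char
  | [] => []
  | h :: t => Char.ofNat (xorN (h :: t)) :: suff t

theorem toNat_ofNat_lt (n : Nat) (h : n < 128) : (Char.ofNat n).toNat = n := by
  have hv : n.isValidChar := Or.inl (by omega)
  simp [Char.ofNat, hv, Char.toNat, Char.ofNatAux]

theorem xorN_foldr_base (l : List Char) (b : Nat) :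
    l.foldr (fun ch n => ch.toNat ^^^ n) b = xorN l ^^^ b := by
  induction l with
  | nil => simp [xorN]
  | cons a t ih => simp [xorN, List.foldr, ih, Nat.xor_assoc]

theorem xorN_append (l : List Char) (h : Char) :
    xorN (l ++ [h]) = xorN l ^^^ h.toNat := by
  have := xorN_foldr_base l (h.toNat ^^^ 0)
  simpa [xorN] using this

theorem xorN_reverse (l : List Char) : xorN l.reverse = xorN l := by
  induction l with
  | nil => rfl
  | cons a t ih =>
      have : xorN (a :: t) = a.toNat ^^^ xorN t := rfl
      rw [List.reverse_cons, xorN_append, ih, this, Nat.xor_comm]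

-- ===== A-side characterisation =====

-- the inner loop over indices equals a fold over the dropped suffix
theorem inner_fold {α : Type} (cs : List Char) (g : α → Char → α) :
    ∀ (k s : Nat) (b0 : α), cs.length - s = k →
    (List.range' s k).foldl (fun b j => g b (cs.getD j ' ')) b0 = (cs.drop s).foldl g b0 := by
  intro k
  induction k with
  | zero =>
      intro s b0 hk
      have : cs.drop s = [] := List.drop_eq_nil_of_le (by omega)
      simp [this]
  | succ k ih =>
      intro s b0 hk
      have hs : s < cs.length := by omega
      have hd : cs.drop s = cs[s] :: cs.drop (s + 1) := List.drop_eq_getElem_cons hs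
      have hgd : cs.getD s ' ' = cs[s] := by
        simp [List.getD_eq_getElem?_getD, List.getElem?_eq_getElem hs]
      rw [List.range'_succ, List.foldl_cons, hd, List.foldl_cons,
        ih (s + 1) (g b0 (cs.getD s ' ')) (by omega), hgd]

-- the nat-level fold matched to A's Char-level fold under the <128 bound
theorem char_fold (l : List Char) (hl : ∀ ch ∈ l, ch.toNat < 128) :
    ∀ (b : Char), b.toNat < 128 →
    l.foldl (fun b ch => Char.ofNat (b.toNat ^^^ ch.toNat)) b
      = Char.ofNat (b.toNat ^^^ xorN l) := by
  induction l with
  | nil => intro b hb; simp [xorN, Char.ofNat_toNat]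
  | cons a t ih =>
      intro b hb
      have ha : a.toNat < 128 := hl a (by simp)
      have hx : b.toNat ^^^ a.toNat < 128 := Nat.xor_lt_two_pow (n := 7) hb ha
      have ht : ∀ ch ∈ t, ch.toNat < 128 := fun ch hm => hl ch (by simp [hm])
      rw [List.foldl_cons, ih ht _ (by rw [toNat_ofNat_lt _ hx]; exact hx),
        toNat_ofNat_lt _ hx]
      have : xorN (a :: t) = a.toNat ^^^ xorN t := rfl
      rw [this, Nat.xor_assoc]

-- the value A writes at position i
def FA (cs : List Char) (i : Nat) : Char :=
  (List.range' (i + 1) (cs.length - (i + 1))).foldl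
    (fun b j => Char.ofNat (b.toNat ^^^ (cs.getD j ' ').toNat)) (cs.getD i ' ')

-- the outer loop writing independent values is a map over range
theorem outer_fold (F : Nat → Char) (a0 : List Char) :
    ∀ n, n ≤ a0.length →
    (List.range n).foldl (fun a i => a.set i (F i)) a0
      = (List.range n).map F ++ a0.drop n := by
  intro n
  induction n with
  | zero => simp
  | succ n ih =>
      intro hn
      have hn' : n < a0.length := by omega
      have hd : a0.drop n = a0[n] :: a0.drop (n + 1) := List.drop_eq_getElem_cons hn'
      rw [List.range_succ, List.foldl_append, List.foldl_cons, List.foldl_nil, ih (by omega),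
        List.map_append, hd, List.set_append_right _ _ (by simp), List.length_map,
        List.length_range, Nat.sub_self, List.set_cons_zero]
      simp

theorem mapFA_eq_suff (cs : List Char) (h : ∀ ch ∈ cs, ch.toNat < 128) :
    (List.range cs.length).map (FA cs) = suff cs := by
  induction cs with
  | nil => simp [suff]
  | cons a t ih =>
      have ha : a.toNat < 128 := h a (by simp)
      have ht : ∀ ch ∈ t, ch.toNat < 128 := fun ch hm => h ch (by simp [hm])
      rw [List.length_cons, List.range_succ_eq_map, List.map_cons, List.map_map]
      have h0 : FA (a :: t) 0 = Char.ofNat (xorN (a :: t)) := by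
        have hi := inner_fold (a :: t)
          (fun (b : Char) ch => Char.ofNat (b.toNat ^^^ ch.toNat)) t.length 1
          ((a :: t).getD 0 ' ') (by simp)
        unfold FA
        simp only [List.length_cons, Nat.add_sub_cancel, Nat.zero_add] at hi ⊢
        rw [hi]
        simp only [List.drop_succ_cons, List.drop_zero, List.getD_cons_zero]
        rw [char_fold t ht a ha]
        rfl
      have hsh : (FA (a :: t)) ∘ (· + 1) = FA t := by
        funext i
        unfold FA
        simp only [Function.comp]
        have h1 := inner_fold (a :: t)
          (fun (b : Char) ch => Char.ofNat (b.toNat ^^^ ch.toNat))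
          ((a :: t).length - (i + 1 + 1)) (i + 1 + 1) ((a :: t).getD (i + 1) ' ') rfl
        have h2 := inner_fold t
          (fun (b : Char) ch => Char.ofNat (b.toNat ^^^ ch.toNat))
          (t.length - (i + 1)) (i + 1) (t.getD i ' ') rfl
        have hlen : (a :: t).length - (i + 1 + 1) = t.length - (i + 1) := by
          simp
        have hgd : (a :: t).getD (i + 1) ' ' = t.getD i ' ' := by simp [List.getD]
        rw [hlen, hgd] at h1 ⊢
        exact h1.trans h2.symm
      rw [h0, hsh, ih ht]
      rfl

theorem y_eq_suff (c : String) (h : ∀ ch ∈ c.toList, ch.toNat < 128) :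
    y c = String.mk (suff c.toList) := by
  unfold y
  have ho := outer_fold (FA c.toList) c.toList c.toList.length le_rfl
  simp only [FA] at ho
  simp only []
  rw [ho, List.drop_length, List.append_nil, mapFA_eq_suff c.toList h]

-- ===== B-side characterisation =====

def outs : Nat → List Char → List Char
  | _, [] => []
  | a0, h :: t => Char.ofNat (a0 ^^^ h.toNat) :: outs (a0 ^^^ h.toNat) t

theorem b_fold (l : List Char) :
    ∀ a0 o0, l.foldl
      (fun (st : Nat × List Char) ch =>
        (st.1 ^^^ ch.toNat, st.2 ++ [Char.ofNat (st.1 ^^^ ch.toNat)])) (a0, o0)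
      = (a0 ^^^ xorN l.reverse, o0 ++ outs a0 l) := by
  induction l with
  | nil => intro a0 o0; simp [xorN, outs]
  | cons a t ih =>
      intro a0 o0
      rw [List.foldl_cons, ih]
      have h1 : a0 ^^^ a.toNat ^^^ xorN t.reverse = a0 ^^^ xorN (a :: t).reverse := by
        rw [xorN_reverse, xorN_reverse]
        have : xorN (a :: t) = a.toNat ^^^ xorN t := rfl
        rw [this, Nat.xor_assoc]
      rw [h1]
      simp [outs]

theorem outs_append (a0 : Nat) (u v : List Char) :
    outs a0 (u ++ v) = outs a0 u ++ outs (a0 ^^^ xorN u.reverse) v := by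
  induction u generalizing a0 with
  | nil => simp [outs, xorN]
  | cons a t ih =>
      have hacc : a0 ^^^ xorN (a :: t).reverse = (a0 ^^^ a.toNat) ^^^ xorN t.reverse := by
        rw [xorN_reverse, xorN_reverse]
        have h : xorN (a :: t) = a.toNat ^^^ xorN t := rfl
        rw [h, ← Nat.xor_assoc]
      simp only [List.cons_append, outs, hacc, ih]

theorem outs_reverse_eq_suff (l : List Char) :
    outs 0 l.reverse = (suff l).reverse := by
  induction l with
  | nil => rfl
  | cons a t ih =>
      rw [List.reverse_cons, outs_append, ih]
      have hx : (0 : Nat) ^^^ xorN t.reverse.reverse = xorN t := by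
        simp [List.reverse_reverse]
      rw [hx]
      have ho : outs (xorN t) [a] = [Char.ofNat (xorN t ^^^ a.toNat)] := rfl
      rw [ho]
      have hc : xorN t ^^^ a.toNat = xorN (a :: t) := by
        have : xorN (a :: t) = a.toNat ^^^ xorN t := rfl
        rw [this, Nat.xor_comm]
      rw [hc]
      simp [suff]

theorem y_alt_eq_suff (c : String) : y_alt c = String.mk (suff c.toList) := by
  unfold y_alt
  simp only []
  rw [b_fold c.toList.reverse 0 []]
  rw [List.nil_append, outs_reverse_eq_suff, List.reverse_reverse]

-- ===== VERDICT (by name: the statement is the Claim_ definition above) =====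
theorem y_spec : Claim_equal_y := by
  intro c hdom
  unfold Spec_y
  have h : ∀ ch ∈ c.toList, ch.toNat < 128 := by
    intro ch hm
    have := (List.all_eq_true.mp hdom) ch hm
    simp [pvDomChar] at this
    omega
  rw [y_eq_suff c h, y_alt_eq_suff c]
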